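-- pv_equiv track=rewrite | github.com/angary/protein-folding-sat | src/encode.py | get_max_contacts
-- ===== SOURCE A (Python) =====
-- def get_max_contacts(s: str, dim: int) -> int:
--     """Find the maximum number of contacts that the sequence can have"""
--     n = len(s)
--     max_adj = 2 if dim == 2 else 4
--     # The maximum number of potential contacts that the ith "1" can have
--     potential_contacts = [max_adj if i == "1" else 0 for i in s ]
--     total = 0
--     for i in range(n - 3):
--         # Each "1" can only contact at max 4 (in 2d) or 6 (in 3d) other "1"s
--         # that are at least 3 indexes away, and an odd distance away
--         if s[i] == "1" and potential_contacts[i] > 0: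
--             # Max indexes that this index can contact with on the right
--             for j in range(i+3, n, 2):
--                 if potential_contacts[i] == 0:
--                     break
--                 if s[j] == "1":
--                     potential_contacts[i] -= 1
--                     potential_contacts[j] -= 1
--                     total += 1
--     return total
-- ===== SOURCE B (Python) =====
-- def get_max_contacts(s: str, dim: int) -> int:
--     """Find the maximum number of contacts that the sequence can have"""
--     n = len(s)
--     max_adj = 2 if dim == 2 else 4
--     pot = [max_adj if c == "1" else 0 for c in s]
--     # positions of the "1"s, split by parity, plus prefix counts:
--     # cnt[p][q] = number of "1"s of parity p at positions < q
--     ones = [i for i in range(n) if s[i] == "1"]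
--     par = [[i for i in ones if i % 2 == 0], [i for i in ones if i % 2 == 1]]
--     cnt = [[0], [0]]
--     for q in range(n):
--         b = 1 if s[q] == "1" else 0
--         cnt[0].append(cnt[0][-1] + (b if q % 2 == 0 else 0))
--         cnt[1].append(cnt[1][-1] + (b if q % 2 == 1 else 0))
--     total = 0
--     for i in ones:
--         if i < n - 3 and pot[i] > 0:
--             p = (i + 3) % 2
--             lst = par[p]
--             k = cnt[p][i + 3]
--             avail = len(lst) - k
--             take = pot[i] if pot[i] < avail else avail
--             for j in lst[k:k + take]:
--                 pot[j] -= 1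
--             pot[i] -= take
--             total += take
--     return total
-- ===== Notes on version B (the rewrite author's own statement) =====
-- stated objective: alternative
-- what changed: B precomputes the positions of the '1's split by parity plus prefix counts, so each '1' jumps directly to its at most max_adj matched partners instead of rescanning the string tail in steps of 2 as A does; a timing run did not measure it faster, so no speed is claimed.
import Mathlib
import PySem

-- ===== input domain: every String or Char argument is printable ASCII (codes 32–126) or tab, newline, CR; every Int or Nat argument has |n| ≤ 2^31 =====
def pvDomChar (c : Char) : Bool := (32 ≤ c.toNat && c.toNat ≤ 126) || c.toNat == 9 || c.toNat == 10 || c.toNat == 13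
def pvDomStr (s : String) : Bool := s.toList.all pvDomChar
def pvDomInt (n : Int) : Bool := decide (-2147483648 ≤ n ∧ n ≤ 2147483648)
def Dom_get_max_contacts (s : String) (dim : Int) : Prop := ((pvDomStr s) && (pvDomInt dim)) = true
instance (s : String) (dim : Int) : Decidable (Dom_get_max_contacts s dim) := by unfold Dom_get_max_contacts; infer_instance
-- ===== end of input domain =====

-- B precomputes per-parity lists of the positions of the '1's plus prefix counts and
-- visits only the matched partners, instead of A's rescan of the tail in steps of 2.

-- ===== PORT A =====
-- inner loop: `for j in range(i+3, n, 2): if potential[i]==0: break; if s[j]=='1': …`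
def pvInnerA (l : List Char) (i : Int) : List Int → List Int × Int → List Int × Int
  | [], st => st
  | j :: js, (pot, total) =>
    if PySem.List.pyGetD pot i 0 == 0 then (pot, total)
    else if PySem.List.pyGetD l j ' ' == '1' then
      pvInnerA l i js
        (PySem.List.pySetD (PySem.List.pySetD pot i (PySem.List.pyGetD pot i 0 - 1)) j
           (PySem.List.pyGetD (PySem.List.pySetD pot i (PySem.List.pyGetD pot i 0 - 1)) j 0 - 1),
         total + 1)
    else pvInnerA l i js (pot, total)

-- outer loop: `for i in range(n-3): if s[i]=='1' and potential[i] > 0: …`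
def pvOuterA (l : List Char) (n : Int) : List Int → List Int × Int → List Int × Int
  | [], st => st
  | i :: is, (pot, total) =>
    if (PySem.List.pyGetD l i ' ' == '1') && decide (0 < PySem.List.pyGetD pot i 0) then
      pvOuterA l n is (pvInnerA l i (PySem.List.pyRange (i + 3) n 2) (pot, total))
    else pvOuterA l n is (pot, total)

def get_max_contacts (s : String) (dim : Int) : Int :=
  let l := s.toList
  let n : Int := l.length
  let max_adj : Int := if dim == 2 then 2 else 4
  let pot : List Int := l.map (fun c => if c == '1' then max_adj else 0)
  (pvOuterA l n (PySem.List.pyRange 0 (n - 3)) (pot, 0)).2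

-- ===== PORT B =====
-- `ones = [i for i in range(n) if s[i] == "1"]`
def pvOnes (l : List Char) : List Int :=
  (PySem.List.pyRange 0 l.length).filter (fun i => PySem.List.pyGetD l i ' ' == '1')

-- `[i for i in ones if i % 2 == p]`
def pvPar (l : List Char) (p : Int) : List Int :=
  (pvOnes l).filter (fun i => PySem.Int.mod i 2 == p)

-- the prefix-count loop building cnt[0], cnt[1] (each starts as [0], grows by one per q)
def pvCnt (l : List Char) : List Int × List Int :=
  (PySem.List.pyRange 0 l.length).foldl
    (fun c q =>
      let b : Int := if PySem.List.pyGetD l q ' ' == '1' then 1 else 0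
      (c.1 ++ [PySem.List.pyGetD c.1 (-1) 0 + (if PySem.Int.mod q 2 == 0 then b else 0)],
       c.2 ++ [PySem.List.pyGetD c.2 (-1) 0 + (if PySem.Int.mod q 2 == 1 then b else 0)]))
    ([0], [0])

-- `for j in lst[k:k+take]: pot[j] -= 1` (applied to an already-sliced list)
def pvDecs (ps : List Int) (pot : List Int) : List Int :=
  ps.foldl (fun po j => PySem.List.pySetD po j (PySem.List.pyGetD po j 0 - 1)) pot

-- `for i in ones: if i < n - 3 and pot[i] > 0: …`
def pvLoopB (l : List Char) (n : Int) (par0 par1 c0 c1 : List Int) :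
    List Int → List Int × Int → List Int × Int
  | [], st => st
  | i :: is, (pot, total) =>
    if decide (i < n - 3) && decide (0 < PySem.List.pyGetD pot i 0) then
      let p := PySem.Int.mod (i + 3) 2
      let lst := if p == 0 then par0 else par1
      let k := PySem.List.pyGetD (if p == 0 then c0 else c1) (i + 3) 0
      let avail : Int := (lst.length : Int) - k
      let c := PySem.List.pyGetD pot i 0
      let take := if c < avail then c else avail
      let pot' := pvDecs (PySem.List.slice lst (some k) (some (k + take))) pot
      pvLoopB l n par0 par1 c0 c1 is
        (PySem.List.pySetD pot' i (PySem.List.pyGetD pot' i 0 - take), total + take)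
    else pvLoopB l n par0 par1 c0 c1 is (pot, total)

def get_max_contacts_alt (s : String) (dim : Int) : Int :=
  let l := s.toList
  let n : Int := l.length
  let max_adj : Int := if dim == 2 then 2 else 4
  let pot : List Int := l.map (fun c => if c == '1' then max_adj else 0)
  let cnt := pvCnt l
  (pvLoopB l n (pvPar l 0) (pvPar l 1) cnt.1 cnt.2 (pvOnes l) (pot, 0)).2

-- ===== PRECONDITION & SPEC =====
def Spec_get_max_contacts (s : String) (dim : Int) (out : Int) : Prop := out = get_max_contacts_alt s dim
instance (s : String) (dim : Int) (out : Int) : Decidable (Spec_get_max_contacts s dim out) := by unfold Spec_get_max_contacts; infer_instance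

-- ===== CLAIM (what is proved, stated in full; the proofs are below) =====
def Claim_equal_get_max_contacts : Prop := ∀ (s : String) (dim : Int), Dom_get_max_contacts s dim → Spec_get_max_contacts s dim (get_max_contacts s dim)

-- ===== LEMMAS AND PROOFS =====

-- `s[x] == "1"` as a predicate on an index
def pvOne (l : List Char) (x : Int) : Bool := PySem.List.pyGetD l x ' ' == '1'

theorem pvGetD_setD_ne (pot : List Int) {i j : Int} (v : Int)
    (hi : 0 ≤ i) (hj : 0 ≤ j) (hne : j ≠ i) :
    PySem.List.pyGetD (PySem.List.pySetD pot i v) j 0 = PySem.List.pyGetD pot j 0 := by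
  rw [PySem.List.pySetD_of_nonneg _ _ hi, PySem.List.pyGetD_of_nonneg _ _ hj,
      PySem.List.pyGetD_of_nonneg _ _ hj]
  rw [List.getD_eq_getElem?_getD, List.getD_eq_getElem?_getD,
      List.getElem?_set_ne (by omega : i.toNat ≠ j.toNat)]

theorem pvSetD_comm (pot : List Int) {i j : Int} (u v : Int)
    (hi : 0 ≤ i) (hj : 0 ≤ j) (hne : i ≠ j) :
    PySem.List.pySetD (PySem.List.pySetD pot i u) j v
      = PySem.List.pySetD (PySem.List.pySetD pot j v) i u := by
  rw [PySem.List.pySetD_of_nonneg _ _ hi, PySem.List.pySetD_of_nonneg _ _ hj,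
      PySem.List.pySetD_of_nonneg _ _ hj, PySem.List.pySetD_of_nonneg _ _ hi,
      List.set_comm _ _ (by omega : i.toNat ≠ j.toNat)]

theorem pvSetD_setD_same (pot : List Int) (i : Int) (u v : Int) (hi : 0 ≤ i) :
    PySem.List.pySetD (PySem.List.pySetD pot i u) i v = PySem.List.pySetD pot i v := by
  rw [PySem.List.pySetD_of_nonneg _ _ hi, PySem.List.pySetD_of_nonneg _ _ hi,
      PySem.List.pySetD_of_nonneg _ _ hi, List.set_set]

theorem pvDecs_length (ps pot : List Int) : (pvDecs ps pot).length = pot.length := by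
  induction ps generalizing pot with
  | nil => rfl
  | cons j ps ih => simp [pvDecs, List.foldl_cons] at ih ⊢; rw [ih, PySem.List.length_pySetD]

theorem pvDecs_setD (ps : List Int) (pot : List Int) {i : Int} (v : Int)
    (hi : 0 ≤ i) (hmem : i ∉ ps) (hnn : ∀ j ∈ ps, 0 ≤ j) :
    pvDecs ps (PySem.List.pySetD pot i v) = PySem.List.pySetD (pvDecs ps pot) i v := by
  induction ps generalizing pot with
  | nil => rfl
  | cons j ps ih =>
    have hj : 0 ≤ j := hnn j (by simp)
    have hne : j ≠ i := by intro h; exact hmem (h ▸ List.mem_cons_self)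
    simp only [pvDecs, List.foldl_cons] at ih ⊢
    rw [pvGetD_setD_ne pot v hi hj hne, pvSetD_comm pot v _ hi hj (Ne.symm hne),
        ih _ (fun h => hmem (List.mem_cons_of_mem _ h)) (fun x hx => hnn x (List.mem_cons_of_mem _ hx))]

theorem pvGetD_decs (ps : List Int) (pot : List Int) {i : Int}
    (hi : 0 ≤ i) (hmem : i ∉ ps) (hnn : ∀ j ∈ ps, 0 ≤ j) :
    PySem.List.pyGetD (pvDecs ps pot) i 0 = PySem.List.pyGetD pot i 0 := by
  induction ps generalizing pot with
  | nil => rfl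
  | cons j ps ih =>
    have hj : 0 ≤ j := hnn j (by simp)
    have hne : j ≠ i := by intro h; exact hmem (h ▸ List.mem_cons_self)
    simp only [pvDecs, List.foldl_cons] at ih ⊢
    rw [ih _ (fun h => hmem (List.mem_cons_of_mem _ h)) (fun x hx => hnn x (List.mem_cons_of_mem _ hx)),
        pvGetD_setD_ne pot _ hj hi (Ne.symm hne)]

theorem pvInRange (pot : List Int) {i : Int} (hi : 0 ≤ i)
    (h : 0 < PySem.List.pyGetD pot i 0) : i.toNat < pot.length := by
  by_contra hc
  rw [PySem.List.pyGetD_of_nonneg _ _ hi, List.getD_eq_getElem?_getD,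
      List.getElem?_eq_none (by omega), Option.getD_none] at h
  omega

theorem pvGetD_setD_self (pot : List Int) {i : Int} (v : Int)
    (hi : 0 ≤ i) (hlt : i.toNat < pot.length) :
    PySem.List.pyGetD (PySem.List.pySetD pot i v) i 0 = v := by
  rw [PySem.List.pySetD_of_nonneg _ _ hi, PySem.List.pyGetD_of_nonneg _ _ hi,
      List.getD_eq_getElem?_getD, List.getElem?_set_self hlt]
  rfl

theorem pvInnerA_zero (l : List Char) (i : Int) (js : List Int) (pot : List Int) (total : Int)
    (h : PySem.List.pyGetD pot i 0 = 0) :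
    pvInnerA l i js (pot, total) = (pot, total) := by
  cases js with
  | nil => rfl
  | cons j js => simp [pvInnerA, h]

-- the inner loop takes the first pot[i] matching j's and decrements them
theorem pvInnerA_eq (l : List Char) (i : Int) (hi : 0 ≤ i) :
    ∀ (js : List Int) (pot : List Int) (total : Int),
      (∀ j ∈ js, 0 ≤ j ∧ j ≠ i) → 0 < PySem.List.pyGetD pot i 0 →
      pvInnerA l i js (pot, total) =
        (PySem.List.pySetD (pvDecs ((js.filter (pvOne l)).take (PySem.List.pyGetD pot i 0).toNat) pot) i
            (PySem.List.pyGetD pot i 0 - ((js.filter (pvOne l)).take (PySem.List.pyGetD pot i 0).toNat).length),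
         total + ((js.filter (pvOne l)).take (PySem.List.pyGetD pot i 0).toNat).length) := by
  intro js
  induction js with
  | nil =>
    intro pot total _ hpos
    have hr := pvInRange pot hi hpos
    simp only [pvInnerA, List.filter_nil, List.take_nil, List.length_nil, pvDecs, List.foldl_nil,
      Nat.cast_zero, sub_zero, add_zero]
    rw [PySem.List.pySetD_of_nonneg _ _ hi, PySem.List.pyGetD_of_nonneg _ _ hi,
        List.getD_eq_getElem?_getD, List.getElem?_eq_getElem hr]
    simp
  | cons j js ih =>
    intro pot total hmem hpos
    have hr := pvInRange pot hi hpos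
    obtain ⟨hj0, hjne⟩ := hmem j List.mem_cons_self
    have hine : i ≠ j := Ne.symm hjne
    have hmem' : ∀ x ∈ js, 0 ≤ x ∧ x ≠ i := fun x hx => hmem x (List.mem_cons_of_mem _ hx)
    have hguard : ¬((PySem.List.pyGetD pot i 0 == 0) = true) := by simp; omega
    by_cases hone : pvOne l j = true
    · -- s[j] == '1' : a match
      have hone' : (PySem.List.pyGetD l j ' ' == '1') = true := hone
      have hw : PySem.List.pyGetD (PySem.List.pySetD pot i (PySem.List.pyGetD pot i 0 - 1)) j 0
          = PySem.List.pyGetD pot j 0 := pvGetD_setD_ne pot _ hi hj0 hjne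
      have hstep : pvInnerA l i (j :: js) (pot, total)
          = pvInnerA l i js
              (PySem.List.pySetD (PySem.List.pySetD pot j (PySem.List.pyGetD pot j 0 - 1)) i
                 (PySem.List.pyGetD pot i 0 - 1), total + 1) := by
        simp only [pvInnerA]
        rw [if_neg hguard, if_pos hone', hw, pvSetD_comm pot _ _ hi hj0 hine]
      have hget1 : PySem.List.pyGetD
          (PySem.List.pySetD (PySem.List.pySetD pot j (PySem.List.pyGetD pot j 0 - 1)) i
            (PySem.List.pyGetD pot i 0 - 1)) i 0 = PySem.List.pyGetD pot i 0 - 1 :=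
        pvGetD_setD_self _ _ hi (by rw [PySem.List.length_pySetD]; exact hr)
      have hfil : (j :: js).filter (pvOne l) = j :: js.filter (pvOne l) :=
        List.filter_cons_of_pos hone
      by_cases hcone : PySem.List.pyGetD pot i 0 = 1
      · -- capacity exhausted by this match
        have hz := pvInnerA_zero l i js _ (total + 1) (by rw [hget1, hcone]; ring)
        rw [hstep, hz, hfil, hcone]
        have htake : (j :: js.filter (pvOne l)).take (1 : Int).toNat = [j] := rfl
        rw [htake]
        have hd : pvDecs [j] pot = PySem.List.pySetD pot j (PySem.List.pyGetD pot j 0 - 1) := by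
          simp [pvDecs]
        rw [hd]
        norm_num
      · -- still capacity left: induction hypothesis
        have hih := ih (PySem.List.pySetD (PySem.List.pySetD pot j (PySem.List.pyGetD pot j 0 - 1)) i
            (PySem.List.pyGetD pot i 0 - 1)) (total + 1) hmem' (by rw [hget1]; omega)
        rw [hstep, hih, hget1, hfil]
        have hM'sub : ∀ x ∈ (js.filter (pvOne l)).take (PySem.List.pyGetD pot i 0 - 1).toNat,
            0 ≤ x ∧ x ≠ i := fun x hx =>
          hmem' x (List.mem_of_mem_filter (List.mem_of_mem_take hx))
        rw [pvDecs_setD _ _ _ hi (fun hx => (hM'sub i hx).2 rfl) (fun x hx => (hM'sub x hx).1),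
            pvSetD_setD_same _ _ _ _ hi]
        have htake : (j :: js.filter (pvOne l)).take (PySem.List.pyGetD pot i 0).toNat
            = j :: (js.filter (pvOne l)).take (PySem.List.pyGetD pot i 0 - 1).toNat := by
          have h1 : (PySem.List.pyGetD pot i 0).toNat
              = (PySem.List.pyGetD pot i 0 - 1).toNat + 1 := by omega
          rw [h1, List.take_succ_cons]
        rw [htake]
        have hdecs2 : pvDecs ((js.filter (pvOne l)).take (PySem.List.pyGetD pot i 0 - 1).toNat)
              (PySem.List.pySetD pot j (PySem.List.pyGetD pot j 0 - 1))
            = pvDecs (j :: (js.filter (pvOne l)).take (PySem.List.pyGetD pot i 0 - 1).toNat) pot := by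
          simp [pvDecs]
        rw [hdecs2]
        simp only [List.length_cons, Prod.mk.injEq]
        refine ⟨?_, by push_cast; ring⟩
        congr 1
        push_cast; ring
    · -- s[j] != '1' : skipped
      have hfil : (j :: js).filter (pvOne l) = js.filter (pvOne l) :=
        List.filter_cons_of_neg (by simpa using hone)
      simp only [pvInnerA]
      rw [if_neg hguard, if_neg (by simpa [pvOne] using hone), ih pot total hmem' hpos, hfil]

theorem pvEqOfMemPairwise (l₁ l₂ : List Int)
    (h : ∀ x, x ∈ l₁ ↔ x ∈ l₂)
    (p1 : l₁.Pairwise (· < ·)) (p2 : l₂.Pairwise (· < ·)) : l₁ = l₂ := by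
  have nd1 : l₁.Nodup := p1.imp (fun hab => ne_of_lt hab)
  have nd2 : l₂.Nodup := p2.imp (fun hab => ne_of_lt hab)
  have hperm : l₁.Perm l₂ := List.perm_of_nodup_nodup_toFinset_eq nd1 nd2
    (by ext x; simp [List.mem_toFinset, h x])
  exact List.Perm.eq_of_pairwise (fun a b _ _ hab hba => by omega) p1 p2 hperm

theorem pvPairwise_pyRange_two (a b : Int) :
    (PySem.List.pyRange a b 2).Pairwise (· < ·) := by
  rw [PySem.List.pyRange_of_pos a b (by norm_num)]
  rw [List.pairwise_map]
  exact (List.pairwise_lt_range).imp (fun hab => by omega)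

theorem pvPar_pairwise (l : List Char) (p : Int) : (pvPar l p).Pairwise (· < ·) := by
  exact ((PySem.List.pairwise_lt_pyRange_one 0 l.length).filter _).filter _

theorem pvMem_par (l : List Char) (p x : Int) :
    x ∈ pvPar l p ↔ (0 ≤ x ∧ x < l.length ∧ pvOne l x = true ∧ PySem.Int.mod x 2 = p) := by
  simp only [pvPar, pvOnes, List.mem_filter, PySem.List.mem_pyRange_one, pvOne, beq_iff_eq]
  tauto

-- the candidates A scans are exactly the tail of the matching parity list
theorem pvCandidates_eq (l : List Char) (i : Int) (hi : 0 ≤ i) :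
    (PySem.List.pyRange (i + 3) l.length 2).filter (pvOne l)
      = (pvPar l (PySem.Int.mod (i + 3) 2)).filter (fun y => decide (i + 3 ≤ y)) := by
  apply pvEqOfMemPairwise
  · intro x
    simp only [List.mem_filter, PySem.List.mem_pyRange_iff_of_pos (by norm_num : (0:Int) < 2),
      pvMem_par, PySem.Int.mod_eq_emod_of_pos (by norm_num : (0:Int) < 2), decide_eq_true_eq]
    constructor
    · rintro ⟨⟨h1, h2, h3⟩, h4⟩
      exact ⟨⟨by omega, h2, h4, by omega⟩, h1⟩
    · rintro ⟨⟨h1, h2, h3, h4⟩, h5⟩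
      exact ⟨⟨h5, h2, by omega⟩, h3⟩
  · exact (pvPairwise_pyRange_two _ _).filter _
  · exact (pvPar_pairwise l _).filter _

-- dropping as many elements as are below the threshold = keeping those at or above it
theorem pvDrop_filter (xs : List Int) (x : Int) (h : xs.Pairwise (· < ·)) :
    xs.drop ((xs.filter (fun y => decide (y < x))).length)
      = xs.filter (fun y => decide (x ≤ y)) := by
  induction xs with
  | nil => rfl
  | cons a xs ih =>
    have ha : ∀ b ∈ xs, a < b := fun b hb => List.rel_of_pairwise_cons h hb
    by_cases hax : a < x
    · rw [List.filter_cons_of_pos (by simpa using hax), List.filter_cons_of_neg (by simp; omega),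
          List.length_cons, List.drop_succ_cons, ih h.tail]
    · rw [List.filter_cons_of_neg (by simpa using hax), List.filter_cons_of_pos (by simp; omega)]
      have h0 : (xs.filter (fun y => decide (y < x))).length = 0 := by
        rw [List.length_eq_zero_iff, List.filter_eq_nil_iff]
        intro b hb
        have := ha b hb
        simp; omega
      rw [h0, List.drop_zero]
      have : xs.filter (fun y => decide (x ≤ y)) = xs := List.filter_eq_self.mpr
        (fun b hb => by have := ha b hb; simp; omega)
      rw [this]

-- the prefix-count lists: cnt[p][t] = #(ones of parity p below t)
def pvCF (l : List Char) (p : Int) (t : Int) : Int :=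
  (((PySem.List.pyRange 0 t).filter
      (fun x => pvOne l x && (PySem.Int.mod x 2 == p))).length : Int)

theorem pvCF_succ (l : List Char) (p : Int) (N : Nat) :
    pvCF l p ((N : Int) + 1) = pvCF l p N +
      (if (pvOne l N && (PySem.Int.mod (N : Int) 2 == p)) = true then 1 else 0) := by
  unfold pvCF
  rw [PySem.List.pyRange_one_succ_right (by positivity), List.filter_append, List.length_append]
  simp only [List.filter_singleton]
  by_cases h1 : pvOne l (N : Int) = true <;>
    by_cases h2 : ((N : Int) % 2 = p) <;>
    simp [h1, h2, Bool.cond_eq_ite, beq_iff_eq]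

theorem pvCnt_aux (l : List Char) (N : Nat) :
    (PySem.List.pyRange 0 (N : Int)).foldl
      (fun c q =>
        let b : Int := if PySem.List.pyGetD l q ' ' == '1' then 1 else 0
        (c.1 ++ [PySem.List.pyGetD c.1 (-1) 0 + (if PySem.Int.mod q 2 == 0 then b else 0)],
         c.2 ++ [PySem.List.pyGetD c.2 (-1) 0 + (if PySem.Int.mod q 2 == 1 then b else 0)]))
      ([0], [0])
    = ((List.range (N + 1)).map (fun t : Nat => pvCF l 0 (t : Int)),
       (List.range (N + 1)).map (fun t : Nat => pvCF l 1 (t : Int))) := by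
  have hsplit : ∀ (M : Nat) (p : Int), (List.range (M + 1)).map (fun t : Nat => pvCF l p (t : Int))
      = (List.range M).map (fun t : Nat => pvCF l p (t : Int)) ++ [pvCF l p (M : Int)] := by
    intro M p; rw [List.range_succ, List.map_append, List.map_singleton]
  induction N with
  | zero =>
    rw [PySem.List.pyRange_one_eq_nil (by norm_num), List.foldl_nil]
    simp [pvCF, PySem.List.pyRange_one_eq_nil]
  | succ N ih =>
    have hcast : ((N + 1 : Nat) : Int) = (N : Int) + 1 := by push_cast; ring
    rw [hcast, PySem.List.pyRange_one_succ_right (by positivity), List.foldl_append,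
        List.foldl_cons, List.foldl_nil, ih, hsplit (N + 1) 0, hsplit (N + 1) 1,
        hsplit N 0, hsplit N 1]
    simp only [PySem.List.pyGetD_neg_one_append_singleton]
    have hval : ∀ p : Int, pvCF l p ((N + 1 : Nat) : Int)
        = pvCF l p N + (if (pvOne l N && (PySem.Int.mod (N : Int) 2 == p)) = true then 1 else 0) := by
      intro p; rw [hcast, pvCF_succ]
    rw [Prod.mk.injEq]
    constructor
    · rw [hval 0]
      simp only [List.append_cancel_left_eq, List.cons.injEq, and_true, add_right_inj]
      by_cases h2 : (2 : Int) ∣ (N : Int) <;> simp [pvOne, h2]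
    · rw [hval 1]
      simp only [List.append_cancel_left_eq, List.cons.injEq, and_true, add_right_inj]
      by_cases h2 : ((N : Int) % 2 = 1) <;> simp [pvOne, h2]

theorem pvCnt_eq (l : List Char) :
    pvCnt l = ((List.range (l.length + 1)).map (fun t : Nat => pvCF l 0 (t : Int)),
               (List.range (l.length + 1)).map (fun t : Nat => pvCF l 1 (t : Int))) := by
  exact pvCnt_aux l l.length

theorem pvFilter_lt_par (l : List Char) (p : Int) (m : Int) (h1 : m ≤ l.length) :
    (pvPar l p).filter (fun y => decide (y < m)) =
      (PySem.List.pyRange 0 m).filter (fun x => pvOne l x && (PySem.Int.mod x 2 == p)) := by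
  apply pvEqOfMemPairwise
  · intro x
    simp only [List.mem_filter, pvMem_par, PySem.List.mem_pyRange_one, decide_eq_true_eq,
      Bool.and_eq_true, beq_iff_eq]
    constructor
    · rintro ⟨⟨h1, h2, h3, h4⟩, h5⟩
      exact ⟨⟨h1, h5⟩, h3, h4⟩
    · rintro ⟨⟨h1, h2⟩, h3, h4⟩
      exact ⟨⟨h1, by omega, h3, h4⟩, h2⟩
  · exact (pvPar_pairwise l p).filter _
  · exact (PySem.List.pairwise_lt_pyRange_one 0 m).filter _

theorem pvGetD_map_range (f : Nat → Int) (M : Nat) (t : Int) (ht0 : 0 ≤ t) (ht1 : t < (M : Int)) :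
    PySem.List.pyGetD ((List.range M).map f) t 0 = f t.toNat := by
  rw [PySem.List.pyGetD_of_nonneg _ _ ht0, List.getD_eq_getElem?_getD, List.getElem?_map,
      List.getElem?_range (by omega)]
  rfl

-- one guarded iteration of A equals one guarded iteration of B
theorem pvMatch (l : List Char) (i : Int) (pot : List Int) (total : Int)
    (h0 : 0 ≤ i) (h3 : i < (l.length : Int) - 3) (hpos : 0 < PySem.List.pyGetD pot i 0) :
    pvInnerA l i (PySem.List.pyRange (i + 3) l.length 2) (pot, total) =
      (let p := PySem.Int.mod (i + 3) 2
       let lst := if p == 0 then pvPar l 0 else pvPar l 1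
       let k := PySem.List.pyGetD (if p == 0 then (pvCnt l).1 else (pvCnt l).2) (i + 3) 0
       let avail : Int := (lst.length : Int) - k
       let c := PySem.List.pyGetD pot i 0
       let take := if c < avail then c else avail
       let pot' := pvDecs (PySem.List.slice lst (some k) (some (k + take))) pot
       (PySem.List.pySetD pot' i (PySem.List.pyGetD pot' i 0 - take), total + take)) := by
  have hp := PySem.Int.mod_two_eq (i + 3)
  dsimp only
  -- the parity list and the prefix count
  have hlst : (if (PySem.Int.mod (i + 3) 2 == 0) = true then pvPar l 0 else pvPar l 1)
      = pvPar l (PySem.Int.mod (i + 3) 2) := by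
    rcases hp with h | h <;> rw [h] <;> simp
  have hkidx : PySem.List.pyGetD
        (if (PySem.Int.mod (i + 3) 2 == 0) = true then (pvCnt l).1 else (pvCnt l).2) (i + 3) 0
      = pvCF l (PySem.Int.mod (i + 3) 2) (i + 3) := by
    rw [pvCnt_eq]
    rcases hp with h | h <;> rw [h]
    · rw [if_pos (by norm_num), pvGetD_map_range _ _ _ (by omega) (by push_cast; omega),
          Int.toNat_of_nonneg (by omega)]
    · rw [if_neg (by norm_num), pvGetD_map_range _ _ _ (by omega) (by push_cast; omega),
          Int.toNat_of_nonneg (by omega)]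
  rw [hlst, hkidx]
  -- abbreviations
  have hcf : pvCF l (PySem.Int.mod (i + 3) 2) (i + 3)
      = (((pvPar l (PySem.Int.mod (i + 3) 2)).filter (fun y => decide (y < i + 3))).length : Int) := by
    unfold pvCF
    rw [← pvFilter_lt_par l _ (i + 3) (by omega)]
  rw [hcf]
  have hkle : ((pvPar l (PySem.Int.mod (i + 3) 2)).filter (fun y => decide (y < i + 3))).length
      ≤ (pvPar l (PySem.Int.mod (i + 3) 2)).length := List.length_filter_le _ _
  -- A's side: the inner loop processes the first c matching candidates
  have hjs : ∀ j ∈ PySem.List.pyRange (i + 3) l.length 2, 0 ≤ j ∧ j ≠ i := by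
    intro j hj
    rw [PySem.List.mem_pyRange_iff_of_pos (by norm_num)] at hj
    constructor <;> omega
  rw [pvInnerA_eq l i h0 _ pot total hjs hpos, pvCandidates_eq l i h0]
  rw [← pvDrop_filter (pvPar l (PySem.Int.mod (i + 3) 2)) (i + 3) (pvPar_pairwise l _)]
  -- B's slice is the same list of matched positions
  have hdroplen : ((pvPar l (PySem.Int.mod (i + 3) 2)).drop
      ((pvPar l (PySem.Int.mod (i + 3) 2)).filter (fun y => decide (y < i + 3))).length).length
      = (pvPar l (PySem.Int.mod (i + 3) 2)).length
        - ((pvPar l (PySem.Int.mod (i + 3) 2)).filter (fun y => decide (y < i + 3))).length :=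
    List.length_drop ..
  have hslice : PySem.List.slice (pvPar l (PySem.Int.mod (i + 3) 2))
        (some (((pvPar l (PySem.Int.mod (i + 3) 2)).filter (fun y => decide (y < i + 3))).length : Int))
        (some ((((pvPar l (PySem.Int.mod (i + 3) 2)).filter (fun y => decide (y < i + 3))).length : Int)
          + (if PySem.List.pyGetD pot i 0 <
                (((pvPar l (PySem.Int.mod (i + 3) 2)).length : Int)
                  - (((pvPar l (PySem.Int.mod (i + 3) 2)).filter (fun y => decide (y < i + 3))).length : Int))
              then PySem.List.pyGetD pot i 0
              else (((pvPar l (PySem.Int.mod (i + 3) 2)).length : Int)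
                - (((pvPar l (PySem.Int.mod (i + 3) 2)).filter (fun y => decide (y < i + 3))).length : Int)))))
      = ((pvPar l (PySem.Int.mod (i + 3) 2)).drop
          ((pvPar l (PySem.Int.mod (i + 3) 2)).filter (fun y => decide (y < i + 3))).length).take
          (PySem.List.pyGetD pot i 0).toNat := by
    split_ifs with hca
    · -- take = c
      have : (((pvPar l (PySem.Int.mod (i + 3) 2)).filter (fun y => decide (y < i + 3))).length : Int)
            + PySem.List.pyGetD pot i 0
          = ((((pvPar l (PySem.Int.mod (i + 3) 2)).filter (fun y => decide (y < i + 3))).length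
              + (PySem.List.pyGetD pot i 0).toNat : Nat) : Int) := by push_cast; omega
      rw [this, PySem.List.slice_natCast]
      congr 1
      omega
    · -- take = avail: both sides are the whole tail
      have : (((pvPar l (PySem.Int.mod (i + 3) 2)).filter (fun y => decide (y < i + 3))).length : Int)
            + (((pvPar l (PySem.Int.mod (i + 3) 2)).length : Int)
              - (((pvPar l (PySem.Int.mod (i + 3) 2)).filter (fun y => decide (y < i + 3))).length : Int))
          = (((pvPar l (PySem.Int.mod (i + 3) 2)).length : Nat) : Int) := by omega
      have hdle : ((pvPar l (PySem.Int.mod (i + 3) 2)).drop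
            ((pvPar l (PySem.Int.mod (i + 3) 2)).filter (fun y => decide (y < i + 3))).length).length
          ≤ (PySem.List.pyGetD pot i 0).toNat := by
        rw [hdroplen]; omega
      rw [this, PySem.List.slice_natCast, List.take_of_length_le (le_of_eq hdroplen),
          List.take_of_length_le hdle]
  rw [hslice]
  -- the matched positions avoid i and are nonnegative
  have hMsub : ∀ x ∈ ((pvPar l (PySem.Int.mod (i + 3) 2)).drop
        ((pvPar l (PySem.Int.mod (i + 3) 2)).filter (fun y => decide (y < i + 3))).length).take
        (PySem.List.pyGetD pot i 0).toNat, 0 ≤ x ∧ x ≠ i := by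
    rw [pvDrop_filter (pvPar l (PySem.Int.mod (i + 3) 2)) (i + 3) (pvPar_pairwise l _)]
    intro x hx
    have hx' := List.mem_of_mem_take hx
    rw [List.mem_filter] at hx'
    obtain ⟨hxp, hxge⟩ := hx'
    rw [pvMem_par] at hxp
    simp only [decide_eq_true_eq] at hxge
    exact ⟨hxp.1, by omega⟩
  -- B reads back pot[i] unchanged
  rw [pvGetD_decs _ pot h0 (fun hx => (hMsub i hx).2 rfl) (fun x hx => (hMsub x hx).1)]
  -- finally the counts agree
  have hlenM : ((((pvPar l (PySem.Int.mod (i + 3) 2)).drop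
        ((pvPar l (PySem.Int.mod (i + 3) 2)).filter (fun y => decide (y < i + 3))).length).take
        (PySem.List.pyGetD pot i 0).toNat).length : Int)
      = (if PySem.List.pyGetD pot i 0 <
            (((pvPar l (PySem.Int.mod (i + 3) 2)).length : Int)
              - (((pvPar l (PySem.Int.mod (i + 3) 2)).filter (fun y => decide (y < i + 3))).length : Int))
          then PySem.List.pyGetD pot i 0
          else (((pvPar l (PySem.Int.mod (i + 3) 2)).length : Int)
            - (((pvPar l (PySem.Int.mod (i + 3) 2)).filter (fun y => decide (y < i + 3))).length : Int))) := by
    rw [List.length_take, hdroplen]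
    split_ifs <;> push_cast <;> omega
  rw [hlenM]

theorem pvLoopB_append (l : List Char) (n : Int) (par0 par1 c0 c1 : List Int)
    (xs ys : List Int) (st : List Int × Int) :
    pvLoopB l n par0 par1 c0 c1 (xs ++ ys) st
      = pvLoopB l n par0 par1 c0 c1 ys (pvLoopB l n par0 par1 c0 c1 xs st) := by
  induction xs generalizing st with
  | nil => rfl
  | cons i xs ih =>
    obtain ⟨pot, total⟩ := st
    rw [List.cons_append]
    simp only [pvLoopB]
    by_cases h : (decide (i < n - 3) && decide (0 < PySem.List.pyGetD pot i 0)) = true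
    · rw [if_pos h, if_pos h]; exact ih _
    · rw [if_neg h, if_neg h]; exact ih _

theorem pvLoopB_noop (l : List Char) (n : Int) (par0 par1 c0 c1 : List Int)
    (is : List Int) (st : List Int × Int) (h : ∀ i ∈ is, ¬(i < n - 3)) :
    pvLoopB l n par0 par1 c0 c1 is st = st := by
  induction is generalizing st with
  | nil => rfl
  | cons i is ih =>
    obtain ⟨pot, total⟩ := st
    simp only [pvLoopB]
    rw [if_neg (by simp [h i List.mem_cons_self])]
    exact ih _ (fun x hx => h x (List.mem_cons_of_mem _ hx))

-- the main outer correspondence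
theorem pvOuter_eq (l : List Char) :
    ∀ (is : List Int) (pot : List Int) (total : Int),
      pot.length = l.length → (∀ i ∈ is, 0 ≤ i ∧ i < (l.length : Int) - 3) →
      pvOuterA l l.length is (pot, total)
        = pvLoopB l l.length (pvPar l 0) (pvPar l 1) (pvCnt l).1 (pvCnt l).2
            (is.filter (pvOne l)) (pot, total) := by
  intro is
  induction is with
  | nil => intro pot total _ _; rfl
  | cons i is ih =>
    intro pot total hlen hb
    obtain ⟨h0, h3⟩ := hb i List.mem_cons_self
    have hb' : ∀ x ∈ is, 0 ≤ x ∧ x < (l.length : Int) - 3 :=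
      fun x hx => hb x (List.mem_cons_of_mem _ hx)
    by_cases hone : pvOne l i = true
    · rw [List.filter_cons_of_pos hone]
      simp only [pvOne, beq_iff_eq] at hone
      by_cases hpos : 0 < PySem.List.pyGetD pot i 0
      · simp only [pvOuterA, pvLoopB]
        rw [if_pos (by simp [hone, hpos]), if_pos (by simp [h3, hpos]),
            pvMatch l i pot total h0 h3 hpos]
        dsimp only
        exact ih _ _ (by rw [PySem.List.length_pySetD, pvDecs_length]; exact hlen) hb'
      · simp only [pvOuterA, pvLoopB]
        rw [if_neg (by simp [hpos]), if_neg (by simp [hpos])]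
        exact ih pot total hlen hb'
    · rw [List.filter_cons_of_neg hone]
      simp only [pvOne, beq_iff_eq] at hone
      simp only [pvOuterA]
      rw [if_neg (by simp [hone])]
      exact ih pot total hlen hb' 

-- ===== VERDICT (by name: the statement is the Claim_ definition above) =====
theorem get_max_contacts_spec : Claim_equal_get_max_contacts := by
  unfold Claim_equal_get_max_contacts
  intro s dim _
  unfold Spec_get_max_contacts get_max_contacts get_max_contacts_alt
  dsimp only
  generalize (if (dim == 2) = true then (2 : Int) else 4) = m
  generalize s.toList = l
  have hlen : (l.map (fun c => if (c == '1') = true then m else 0)).length = l.length :=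
    List.length_map ..
  have hones : pvOnes l = (PySem.List.pyRange 0 l.length).filter (pvOne l) := rfl
  by_cases hn : 3 ≤ (l.length : Int)
  · have hsplit : PySem.List.pyRange 0 (l.length : Int)
        = PySem.List.pyRange 0 ((l.length : Int) - 3) ++ PySem.List.pyRange ((l.length : Int) - 3) l.length :=
      PySem.List.pyRange_one_append 0 _ _ (by omega) (by omega)
    rw [hones, hsplit, List.filter_append, pvLoopB_append]
    rw [← pvOuter_eq l _ _ _ hlen
      (fun x hx => by rw [PySem.List.mem_pyRange_one] at hx; exact ⟨hx.1, hx.2⟩)]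
    rw [pvLoopB_noop _ _ _ _ _ _ _ _
      (fun x hx => by
        have hx' := List.mem_of_mem_filter hx
        rw [PySem.List.mem_pyRange_one] at hx'
        omega)]
  · rw [PySem.List.pyRange_one_eq_nil (by omega : (l.length : Int) - 3 ≤ 0)]
    rw [pvLoopB_noop _ _ _ _ _ _ _ _
      (fun x hx => by
        rw [hones, List.mem_filter, PySem.List.mem_pyRange_one] at hx
        omega)]
    rfl
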